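-- pv_equiv track=rewrite | github.com/marcusguelfi/meli_api_vanzak | src/jobs.py | _stable_header_from_rows
-- ===== SOURCE A (Python) =====
-- from typing import Any, Dict, List, Optional, Iterable, Tuple
--
-- PRIMARY_COL_ORDER = [
--     "advertiser_id", "site_id",
--     "date",
--     "campaign_id", "campaign_name",
--     "ad_id",
--     "item_id", "item_title", "seller_sku",
--     "status",
-- ]
--
-- def _stable_header_from_rows(existing_header: List[str], rows: List[Dict[str, Any]]) -> List[str]:
--     keys = set(existing_header)
--     for r in rows:
--         keys.update(r.keys())
--     header: List[str] = [c for c in PRIMARY_COL_ORDER if c in keys]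
--     remaining = sorted(k for k in keys if k not in header and k)
--     header.extend(remaining)
--     return header
-- ===== SOURCE B (Python) =====
-- from typing import Any, Dict, List
--
-- PRIMARY_COL_ORDER = [
--     "advertiser_id", "site_id",
--     "date",
--     "campaign_id", "campaign_name",
--     "ad_id",
--     "item_id", "item_title", "seller_sku",
--     "status",
-- ]
--
-- PRIMARY_INDEX = {c: i for i, c in enumerate(PRIMARY_COL_ORDER)}
--
-- def _stable_header_from_rows(existing_header: List[str], rows: List[Dict[str, Any]]) -> List[str]:
--     keys = set(existing_header).union(*(r.keys() for r in rows))
--     return sorted(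
--         (k for k in keys if k),
--         key=lambda k: (PRIMARY_INDEX.get(k, len(PRIMARY_COL_ORDER)), k),
--     )
-- ===== Notes on version B (the rewrite author's own statement) =====
-- stated objective: simpler
-- what changed: Replaces A's two-phase construction (filter PRIMARY_COL_ORDER by membership, then sort the remaining truthy keys and append) with a single sorted() over all truthy keys using the composite key (PRIMARY_INDEX.get(k, len(PRIMARY_COL_ORDER)), k).
import Mathlib
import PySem

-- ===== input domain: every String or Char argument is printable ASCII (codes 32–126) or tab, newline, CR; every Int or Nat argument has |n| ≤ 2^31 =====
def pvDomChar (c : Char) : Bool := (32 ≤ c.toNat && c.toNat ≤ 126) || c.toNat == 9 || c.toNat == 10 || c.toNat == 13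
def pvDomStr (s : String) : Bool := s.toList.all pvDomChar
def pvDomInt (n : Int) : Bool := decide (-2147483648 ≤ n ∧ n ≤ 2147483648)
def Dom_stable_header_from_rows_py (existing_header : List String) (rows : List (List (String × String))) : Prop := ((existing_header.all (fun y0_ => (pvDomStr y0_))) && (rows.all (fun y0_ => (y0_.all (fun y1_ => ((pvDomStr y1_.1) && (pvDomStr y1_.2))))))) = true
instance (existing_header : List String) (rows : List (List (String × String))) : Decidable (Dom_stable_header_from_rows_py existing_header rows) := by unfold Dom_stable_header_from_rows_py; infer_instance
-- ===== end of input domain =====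

-- B replaces A's two-phase filter-primaries-then-sort-remainder with a single sorted() over all
-- truthy keys under the composite key (primary-index-or-10, name); objective: simpler.

-- ===== PORT A =====
def PRIMARY_COL_ORDER : List String :=
  ["advertiser_id", "site_id", "date", "campaign_id", "campaign_name",
   "ad_id", "item_id", "item_title", "seller_sku", "status"]

def stable_header_from_rows_py (existing_header : List String) (rows : List (List (String × String))) : List String :=
  -- keys = set(existing_header); for r in rows: keys.update(r.keys())
  let keys : PySem.Set String :=
    rows.foldl (fun s r => PySem.Set.update s (r.map Prod.fst)) (PySem.Set.ofList existing_header)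
  -- header = [c for c in PRIMARY_COL_ORDER if c in keys]
  let header := PRIMARY_COL_ORDER.filter (fun c => PySem.Set.contains keys c)
  -- remaining = sorted(k for k in keys if k not in header and k)   (identity key; injective on the set, so set order is immaterial)
  let remaining := PySem.List.sorted (keys.filter (fun k => !(header.contains k) && !(k == ""))) (fun x => x) false
  header ++ remaining

-- ===== PORT B =====
-- PRIMARY_INDEX = {c: i for i, c in enumerate(PRIMARY_COL_ORDER)}
def PRIMARY_INDEX : PySem.Dict String Int :=
  (PySem.List.enumerate PRIMARY_COL_ORDER 0).foldl (fun d p => d.insert p.2 p.1) PySem.Dict.empty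

def stable_header_from_rows_py_alt (existing_header : List String) (rows : List (List (String × String))) : List String :=
  -- keys = set(existing_header).union(*(r.keys() for r in rows))
  let keys : PySem.Set String :=
    rows.foldl (fun s r => PySem.Set.union s (r.map Prod.fst)) (PySem.Set.ofList existing_header)
  -- sorted((k for k in keys if k), key=lambda k: (PRIMARY_INDEX.get(k, len(PRIMARY_COL_ORDER)), k))
  -- (composite key is injective on the set, so set order is immaterial)
  PySem.List.sorted2 (keys.filter (fun k => !(k == "")))
    (fun k => PySem.Dict.getD PRIMARY_INDEX k ((PRIMARY_COL_ORDER.length : Int)))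
    (fun k => k) false

-- ===== PRECONDITION & SPEC =====
def Spec_stable_header_from_rows_py (existing_header : List String) (rows : List (List (String × String))) (out : List String) : Prop := out = stable_header_from_rows_py_alt existing_header rows
instance (existing_header : List String) (rows : List (List (String × String))) (out : List String) : Decidable (Spec_stable_header_from_rows_py existing_header rows out) := by unfold Spec_stable_header_from_rows_py; infer_instance

-- ===== CLAIM (what is proved, stated in full; the proofs are below) =====
def Claim_equal_stable_header_from_rows_py : Prop := ∀ (existing_header : List String) (rows : List (List (String × String))), Dom_stable_header_from_rows_py existing_header rows → Spec_stable_header_from_rows_py existing_header rows (stable_header_from_rows_py existing_header rows)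

-- ===== LEMMAS AND PROOFS =====

-- B's composite key, as one lexicographic key into a linear order
def pvKey1 (k : String) : Int := PySem.Dict.getD PRIMARY_INDEX k ((PRIMARY_COL_ORDER.length : Int))
-- sorted2 with keys (k1, k2) is sorted with the lexicographic key
theorem pv_sorted2_eq_sorted_lex {α : Type} (xs : List α) (k1 : α → Int) (k2 : α → String) :
    PySem.List.sorted2 xs k1 k2 false = PySem.List.sorted xs (fun x => toLex (k1 x, k2 x)) false := by
  rw [PySem.List.sorted_eq_foldl_insertBy]
  show List.foldl (fun acc x => PySem.List.insertBy _ x acc) [] xs = _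
  congr 1
  funext acc x
  congr 1
  funext a b
  rcases lt_trichotomy (k1 a) (k1 b) with h | h | h
  · simp [Prod.Lex.lt_iff, h, not_lt_of_gt h]
  · simp [Prod.Lex.lt_iff, h]
  · simp [Prod.Lex.lt_iff, not_lt_of_gt h, ne_of_gt h, h]

theorem pv_key1_lt_ten : ∀ a ∈ PRIMARY_COL_ORDER, pvKey1 a < 10 := by decide

theorem pv_primary_pairwise : PRIMARY_COL_ORDER.Pairwise (fun a b => pvKey1 a < pvKey1 b) := by decide

theorem pv_primary_nodup : PRIMARY_COL_ORDER.Nodup := by decide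

theorem pv_primary_ne_empty : ∀ a ∈ PRIMARY_COL_ORDER, a ≠ "" := by decide

theorem pv_key1_of_not_primary (x : String) (h : x ∉ PRIMARY_COL_ORDER) : pvKey1 x = 10 := by
  have hk : (PRIMARY_INDEX : PySem.Dict String Int).keys = PySem.Set.ofList PRIMARY_COL_ORDER := by
    have := PySem.Dict.keys_foldl_insert_key (ν := Int)
      (PySem.List.enumerate PRIMARY_COL_ORDER 0) (fun p => p.2) (fun d p => p.1) PySem.Dict.empty
    simpa [PRIMARY_INDEX, PySem.List.map_snd_enumerate] using this
  have hget : (PRIMARY_INDEX : PySem.Dict String Int).get? x = none := by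
    rw [PySem.Dict.get?_eq_none_iff_not_mem_keys, hk]
    simpa [PySem.Set.mem_ofList] using h
  simp [pvKey1, PySem.Dict.getD_eq_get?_getD, hget, PRIMARY_COL_ORDER]

theorem pv_union_eq_update (rows : List (List (String × String))) (s : PySem.Set String) :
    rows.foldl (fun s r => PySem.Set.union s (r.map Prod.fst)) s
      = rows.foldl (fun s r => PySem.Set.update s (r.map Prod.fst)) s := rfl

theorem pv_keys_nodup (rows : List (List (String × String))) (s : PySem.Set String) (h : s.Nodup) :
    (rows.foldl (fun s r => PySem.Set.update s (r.map Prod.fst)) s).Nodup := by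
  induction rows generalizing s with
  | nil => exact h
  | cons r rs ih => exact ih _ (PySem.Set.nodup_update _ _ h)

-- the core identity, for any duplicate-free key list K
theorem pv_core (K : List String) (hnd : K.Nodup) :
    (PRIMARY_COL_ORDER.filter (fun c => PySem.Set.contains K c))
      ++ PySem.List.sorted (K.filter (fun k =>
            !((PRIMARY_COL_ORDER.filter (fun c => PySem.Set.contains K c)).contains k) && !(k == ""))) (fun x => x) false
    = PySem.List.sorted2 (K.filter (fun k => !(k == ""))) pvKey1 (fun k => k) false := by
  set header := PRIMARY_COL_ORDER.filter (fun c => PySem.Set.contains K c) with hheader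
  set R := K.filter (fun k => !(header.contains k) && !(k == "")) with hR
  set remaining := PySem.List.sorted R (fun x => x) false with hrem
  have hmem_header : ∀ x, x ∈ header ↔ x ∈ PRIMARY_COL_ORDER ∧ x ∈ K := by
    intro x; simp [hheader, List.mem_filter]
  have hmem_rem : ∀ x, x ∈ remaining ↔ x ∈ K ∧ x ∉ header ∧ x ≠ "" := by
    intro x
    simp only [hrem, PySem.List.mem_sorted, hR, List.mem_filter, Bool.and_eq_true,
      Bool.not_eq_eq_eq_not, Bool.not_true, List.contains_eq_mem, decide_eq_false_iff_not,
      beq_eq_false_iff_ne, ne_eq]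
  have hrem_not_primary : ∀ x ∈ remaining, x ∉ PRIMARY_COL_ORDER := by
    intro x hx hxp
    rcases (hmem_rem x).1 hx with ⟨hxK, hxh, _⟩
    exact hxh ((hmem_header x).2 ⟨hxp, hxK⟩)
  rw [pv_sorted2_eq_sorted_lex]
  refine (PySem.List.sorted_eq_of_perm_of_pairwise_lt (κ := Lex (Int × String)) _ (header ++ remaining) (fun x => toLex (pvKey1 x, x)) ?_ ?_).symm
  · -- permutation
    have h1 : header.Nodup := pv_primary_nodup.filter _
    have h2 : remaining.Nodup := ((PySem.List.sorted_perm R _ _).nodup_iff).2 (hnd.filter _)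
    have hdisj : ∀ x ∈ header, x ∉ remaining := by
      intro x hx hxr; exact ((hmem_rem x).1 hxr).2.1 hx
    have hys : (header ++ remaining).Nodup := by
      rw [List.nodup_append]
      exact ⟨h1, h2, fun x hx b hb hxb => hdisj x hx (hxb ▸ hb)⟩
    rw [List.perm_ext_iff_of_nodup hys (hnd.filter _)]
    intro x
    simp only [List.mem_append, List.mem_filter, Bool.not_eq_eq_eq_not, Bool.not_true,
      beq_eq_false_iff_ne, ne_eq]
    constructor
    · rintro (hx | hx)
      · rcases (hmem_header x).1 hx with ⟨hxp, hxK⟩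
        exact ⟨hxK, pv_primary_ne_empty x hxp⟩
      · rcases (hmem_rem x).1 hx with ⟨hxK, _, hxe⟩
        exact ⟨hxK, hxe⟩
    · rintro ⟨hxK, hxe⟩
      by_cases hxh : x ∈ header
      · exact Or.inl hxh
      · exact Or.inr ((hmem_rem x).2 ⟨hxK, hxh, hxe⟩)
  · -- pairwise strict lexicographic order
    rw [List.pairwise_append]
    refine ⟨?_, ?_, ?_⟩
    · have := pv_primary_pairwise.sublist (List.filter_sublist (l := PRIMARY_COL_ORDER)
        (p := fun c => PySem.Set.contains K c))
      exact this.imp (fun h => by simp [Prod.Lex.lt_iff]; exact Or.inl h)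
    · have hle : remaining.Pairwise (fun a b => a ≤ b) := by
        simpa [hrem] using PySem.List.sorted_pairwise R (fun x : String => x)
      have hne : remaining.Pairwise (fun a b => a ≠ b) :=
        ((PySem.List.sorted_perm R _ _).nodup_iff).2 (hnd.filter _)
      refine (hle.and hne).imp_of_mem ?_
      intro a b ha hb ⟨h1, h2⟩
      have ka : pvKey1 a = 10 := pv_key1_of_not_primary a (hrem_not_primary a ha)
      have kb : pvKey1 b = 10 := pv_key1_of_not_primary b (hrem_not_primary b hb)
      exact Prod.Lex.lt_iff.2 (Or.inr ⟨by simp [ka, kb], lt_of_le_of_ne h1 h2⟩)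
    · intro a ha b hb
      have hap : a ∈ PRIMARY_COL_ORDER := ((hmem_header a).1 ha).1
      have ka : pvKey1 a < 10 := pv_key1_lt_ten a hap
      have kb : pvKey1 b = 10 := pv_key1_of_not_primary b (hrem_not_primary b hb)
      simp [Prod.Lex.lt_iff]
      exact Or.inl (by omega)

-- ===== VERDICT (by name: the statement is the Claim_ definition above) =====
theorem stable_header_from_rows_py_spec : Claim_equal_stable_header_from_rows_py := by
  intro existing_header rows _
  unfold Spec_stable_header_from_rows_py
  simp only [stable_header_from_rows_py, stable_header_from_rows_py_alt]
  rw [pv_union_eq_update, show (fun k => PySem.Dict.getD PRIMARY_INDEX k ((PRIMARY_COL_ORDER.length : Int))) = pvKey1 from rfl]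
  exact pv_core _ (pv_keys_nodup rows _ (PySem.Set.nodup_ofList existing_header))
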